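-- pv_equiv track=rewrite | github.com/Codebenderr/Cursed_CPP | cursed_cpp.py | is_tabs_spaces_mixed
-- ===== SOURCE A (Python) =====
-- def is_tabs_spaces_mixed(line: str) -> bool:
-- 	"""Check whether there are both spaces and tabs in the prefix of a line"""
--
--
-- 	tabs = False
-- 	spaces = False
--
--
-- 	for i in line:
-- 		if i == '\t':
-- 			tabs = True
-- 		elif i == ' ':
-- 			spaces = True
-- 		else:
-- 			break
--
--
-- 	return tabs and spaces
-- ===== SOURCE B (Python) =====
-- def is_tabs_spaces_mixed(line: str) -> bool:
--     # Mixed iff the leading run of {' ', '\t'} is non-constant, i.e. iff some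
--     # ADJACENT pair inside that run differs. Scan adjacent pairs only.
--     for a, b in zip(line, line[1:]):
--         if a not in ' \t' or b not in ' \t':
--             return False
--         if a != b:
--             return True
--     return False
-- ===== Notes on version B (the rewrite author's own statement) =====
-- stated objective: alternative
-- what changed: Replaced A's flag-setting prefix scan by a different characterization: the leading whitespace run is mixed iff some adjacent pair of characters inside it differs, so B scans adjacent pairs (zip of the string with its tail) and keeps no flags and builds no prefix.
import Mathlib
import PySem

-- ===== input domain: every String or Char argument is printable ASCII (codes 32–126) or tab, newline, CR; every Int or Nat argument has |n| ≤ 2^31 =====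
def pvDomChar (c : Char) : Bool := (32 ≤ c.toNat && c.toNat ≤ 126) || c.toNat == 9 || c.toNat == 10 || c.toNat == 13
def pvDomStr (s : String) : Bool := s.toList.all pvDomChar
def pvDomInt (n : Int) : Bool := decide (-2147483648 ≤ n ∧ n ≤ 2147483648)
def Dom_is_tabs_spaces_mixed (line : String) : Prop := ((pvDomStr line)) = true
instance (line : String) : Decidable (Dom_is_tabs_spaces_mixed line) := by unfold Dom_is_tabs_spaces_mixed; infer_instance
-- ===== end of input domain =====

-- B replaces A's flag-setting prefix loop by a different characterization: the leading
-- whitespace run is mixed iff some ADJACENT pair inside it differs; objective: alternative.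

-- ===== PORT A =====
-- A's for-loop with its two mutable flags and break, as structural recursion over the chars
def pvLoopA : List Char → Bool → Bool → Bool
  | [], tabs, spaces => tabs && spaces
  | c :: rest, tabs, spaces =>
      if c = '\t' then pvLoopA rest true spaces
      else if c = ' ' then pvLoopA rest tabs true
      else tabs && spaces

def is_tabs_spaces_mixed (line : String) : Bool :=
  pvLoopA line.toList false false

-- ===== PORT B =====
-- B's loop over zip(line, line[1:]): adjacent pairs, as structural recursion
def pvLoopB : List Char → Bool
  | a :: b :: rest =>
      if ¬(a = ' ' ∨ a = '\t') ∨ ¬(b = ' ' ∨ b = '\t') then false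
      else if a ≠ b then true
      else pvLoopB (b :: rest)
  | _ => false

def is_tabs_spaces_mixed_alt (line : String) : Bool :=
  pvLoopB line.toList

-- ===== PRECONDITION & SPEC =====
def Spec_is_tabs_spaces_mixed (line : String) (out : Bool) : Prop := out = is_tabs_spaces_mixed_alt line
instance (line : String) (out : Bool) : Decidable (Spec_is_tabs_spaces_mixed line out) := by unfold Spec_is_tabs_spaces_mixed; infer_instance

-- ===== CLAIM (what is proved, stated in full; the proofs are below) =====
def Claim_equal_is_tabs_spaces_mixed : Prop := ∀ (line : String), Dom_is_tabs_spaces_mixed line → Spec_is_tabs_spaces_mixed line (is_tabs_spaces_mixed line)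

-- ===== LEMMAS AND PROOFS =====
-- Both loops compute: the leading {' ','\t'} run contains both '\t' and ' '.
theorem pvLoopA_eq (l : List Char) (t s : Bool) :
    pvLoopA l t s =
      ((t || (l.takeWhile (fun c => c = ' ' || c = '\t')).contains '\t') &&
       (s || (l.takeWhile (fun c => c = ' ' || c = '\t')).contains ' ')) := by
  induction l generalizing t s with
  | nil => simp [pvLoopA]
  | cons c rest ih =>
      by_cases h : c = '\t'
      · subst h
        rw [show pvLoopA ('\t' :: rest) t s = pvLoopA rest true s from rfl]
        rw [ih]; simp
      · by_cases h2 : c = ' '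
        · subst h2
          rw [show pvLoopA (' ' :: rest) t s = pvLoopA rest t true from rfl]
          rw [ih]; simp
        · rw [show pvLoopA (c :: rest) t s = (t && s) from by simp [pvLoopA, h, h2]]
          simp [h, h2]

theorem pvLoopB_eq (l : List Char) :
    pvLoopB l =
      ((l.takeWhile (fun c => c = ' ' || c = '\t')).contains '\t' &&
       (l.takeWhile (fun c => c = ' ' || c = '\t')).contains ' ') := by
  induction l with
  | nil => simp [pvLoopB]
  | cons a rest ih =>
      cases rest with
      | nil =>
          by_cases h : a = ' '
          · subst h; simp [pvLoopB]
          · by_cases h2 : a = '\t'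
            · subst h2; simp [pvLoopB]
            · simp [pvLoopB, h, h2]
      | cons b rest' =>
          by_cases ha : a = ' ' ∨ a = '\t'
          · by_cases hb : b = ' ' ∨ b = '\t'
            · by_cases hab : a = b
              · subst hab
                rw [show pvLoopB (a :: a :: rest') = pvLoopB (a :: rest') from by
                      simp [pvLoopB, ha]]
                rw [ih]
                rcases ha with h | h <;> subst h <;> simp
              · -- a ≠ b, both whitespace: {a,b} = {' ','\t'}
                rw [show pvLoopB (a :: b :: rest') = true from by
                      simp [pvLoopB, ha, hb, hab]]
                rcases ha with h | h <;> rcases hb with h2 | h2 <;>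
                  first
                    | (exact absurd (h.trans h2.symm) hab)
                    | (subst h; subst h2; simp)
            · -- b not whitespace: B stops false; run is [a], a single char
              rw [show pvLoopB (a :: b :: rest') = false from by
                    simp [pvLoopB, hb]]
              have hb' : ¬(b = ' ' || b = '\t') = true := by
                simpa using hb
              rcases ha with h | h <;> subst h <;> simp [List.takeWhile, hb']
          · rw [show pvLoopB (a :: b :: rest') = false from by
                  simp [pvLoopB, ha]]
            have ha' : ¬(a = ' ' || a = '\t') = true := by simpa using ha
            simp [List.takeWhile, ha']

-- ===== VERDICT (by name: the statement is the Claim_ definition above) =====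
theorem is_tabs_spaces_mixed_spec : Claim_equal_is_tabs_spaces_mixed := by
  intro line _
  unfold Spec_is_tabs_spaces_mixed is_tabs_spaces_mixed is_tabs_spaces_mixed_alt
  rw [pvLoopA_eq, pvLoopB_eq]
  simp
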